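-- pv_equiv track=rewrite | github.com/gurugurugum/Python | lisp.py | passThroughDefun
-- ===== SOURCE A (Python) =====
-- def findLastLeftBracketOfContinuingLeftBrackets(list, startPlace):
-- 	lbc = 0
-- 	lbp = startPlace
-- 	while(list[lbp] == "("):
-- 		lbc += 1
-- 		lbp += 1
-- 	lbp -= 1
-- 	return [lbc, lbp]
--
-- def findRightBracket(list, startPlace):
-- 	lbc = 0
-- 	rbp = startPlace
-- 	while(list[rbp] != ")"):
-- 		if list[rbp] == "(":
-- 			lbc += 1
-- 		rbp += 1
-- 	return [lbc, rbp]
--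
-- def passThroughDefun(input, startPlace):
-- 	tmp = findLastLeftBracketOfContinuingLeftBrackets(input, startPlace)
-- 	lbc = tmp[0] #"("の数
-- 	lbp = tmp[1] #最後に読んだ"("の場所
-- 	place = lbp
--
-- 	if input[place + 1] == "defun":
-- 		while lbc > 0:
-- 			tmp = findRightBracket(input, place + 1)
-- 			lbc += tmp[0] - 1
-- 			place = tmp[1]
--
-- 	return place
-- ===== SOURCE B (Python) =====
-- def passThroughDefun(input, startPlace):
-- 	depth = 0
-- 	place = startPlace
-- 	while input[place] == "(":
-- 		depth += 1
-- 		place += 1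
-- 	place -= 1
-- 	if input[place + 1] != "defun":
-- 		return place
-- 	while depth > 0:
-- 		place += 1
-- 		c = input[place]
-- 		if c == "(":
-- 			depth += 1
-- 		elif c == ")":
-- 			depth -= 1
-- 	return place
-- ===== Notes on version B (the rewrite author's own statement) =====
-- stated objective: simpler
-- what changed: Collapses A's two helper functions and its outer loop that repeatedly re-dispatches to findRightBracket into one flat function with a single depth-counter while-loop.
-- outside the precondition, e.g. on passThroughDefun(['(', ')'], -2): A returns -2, B returns -2
import Mathlib
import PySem

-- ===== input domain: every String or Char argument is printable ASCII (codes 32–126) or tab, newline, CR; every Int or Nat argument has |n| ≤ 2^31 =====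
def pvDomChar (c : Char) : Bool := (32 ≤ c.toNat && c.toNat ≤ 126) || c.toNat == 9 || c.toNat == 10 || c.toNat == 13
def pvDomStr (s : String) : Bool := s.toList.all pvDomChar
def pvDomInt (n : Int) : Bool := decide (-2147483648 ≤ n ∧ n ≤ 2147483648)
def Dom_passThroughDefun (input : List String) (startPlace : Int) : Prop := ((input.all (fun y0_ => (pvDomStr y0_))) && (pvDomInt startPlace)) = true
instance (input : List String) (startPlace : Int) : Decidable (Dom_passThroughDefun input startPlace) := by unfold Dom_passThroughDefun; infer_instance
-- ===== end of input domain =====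

-- B collapses A's two helper scans and the outer re-dispatch loop into one flat
-- depth-counter loop (objective: simpler); return values agree wherever A returns inside Pre_.

-- ===== PORT A =====
-- findLastLeftBracketOfContinuingLeftBrackets: fuel makes the while-loop structural;
-- none encodes IndexError (or fuel-out, which Pre_ rules out: input.length+2 is always enough there).
def pvCountA (input : List String) (lbc lbp : Int) : Nat → Option (Int × Int)
  | 0 => none
  | f + 1 =>
    (PySem.List.pyGet? input lbp).bind fun x =>
      if x = "(" then pvCountA input (lbc + 1) (lbp + 1) f else some (lbc, lbp - 1)

-- findRightBracket
def pvFindRB (input : List String) (lbc rbp : Int) : Nat → Option (Int × Int)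
  | 0 => none
  | f + 1 =>
    (PySem.List.pyGet? input rbp).bind fun x =>
      if x = ")" then some (lbc, rbp)
      else pvFindRB input (if x = "(" then lbc + 1 else lbc) (rbp + 1) f

-- the `while lbc > 0` loop of passThroughDefun
def pvOuterA (input : List String) (lbc place : Int) : Nat → Option Int
  | 0 => none
  | f + 1 =>
    if lbc > 0 then
      (pvFindRB input 0 (place + 1) (f + 1)).bind fun cq =>
        pvOuterA input (lbc + cq.1 - 1) cq.2 f
    else some place

def passThroughDefun (input : List String) (startPlace : Int) : Int :=
  (pvCountA input 0 startPlace (input.length + 2)).elim 0 fun lb =>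
    (PySem.List.pyGet? input (lb.2 + 1)).elim 0 fun x =>
      if x = "defun" then (pvOuterA input lb.1 lb.2 (input.length + 2)).getD 0
      else lb.2

-- ===== PORT B =====
-- B's first while-loop (count the run of "(" starting at startPlace)
def pvScanB (input : List String) (depth place : Int) : Nat → Option (Int × Int)
  | 0 => none
  | f + 1 =>
    (PySem.List.pyGet? input place).bind fun x =>
      if x = "(" then pvScanB input (depth + 1) (place + 1) f else some (depth, place - 1)

-- B's `while depth > 0` loop
def pvCloseB (input : List String) (depth place : Int) : Nat → Option Int
  | 0 => none
  | f + 1 =>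
    if depth > 0 then
      (PySem.List.pyGet? input (place + 1)).bind fun c =>
        pvCloseB input (depth + (if c = "(" then 1 else if c = ")" then -1 else 0)) (place + 1) f
    else some place

def passThroughDefun_alt (input : List String) (startPlace : Int) : Int :=
  (pvScanB input 0 startPlace (input.length + 2)).elim 0 fun dp =>
    (PySem.List.pyGet? input (dp.2 + 1)).elim 0 fun x =>
      if x ≠ "defun" then dp.2
      else (pvCloseB input dp.1 dp.2 (input.length + 2)).getD 0

-- ===== PRECONDITION & SPEC =====
-- weight of a token for the bracket balance (")" closes, "(" opens)
def pvWt (x : String) : Int := if x = ")" then 1 else if x = "(" then -1 else 0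

-- Pre_ excludes (a) the inputs on which A raises IndexError (a scan runs off the end of the
-- list: no k / no m below exists), and (b) negative startPlace pointing at a "(", where Python's
-- negative-index wraparound makes the scan jump to the head of the list — there A (and B, which
-- follows the identical wraparound) may still return; that accidental corner is not modelled.
def Pre_passThroughDefun (input : List String) (startPlace : Int) : Prop :=
  (startPlace < 0 ∧ -(input.length : Int) ≤ startPlace ∧
     PySem.List.pyGet? input startPlace ≠ some "(")
  ∨ (0 ≤ startPlace ∧ ∃ k : Nat, k < input.length ∧ startPlace + (k : Int) < (input.length : Int) ∧
       (∀ j : Nat, j < k → PySem.List.pyGet? input (startPlace + (j : Int)) = some "(") ∧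
       PySem.List.pyGet? input (startPlace + (k : Int)) ≠ some "(" ∧
       (PySem.List.pyGet? input (startPlace + (k : Int)) = some "defun" → 0 < k →
         ∃ m : Nat, m < input.length ∧ startPlace + (k : Int) + (m : Int) < (input.length : Int) ∧
           (∑ j ∈ Finset.range (m + 1),
              pvWt (PySem.List.pyGetD input (startPlace + (k : Int) + (j : Int)) "")) = (k : Int)))

instance (input : List String) (startPlace : Int) : Decidable (Pre_passThroughDefun input startPlace) := by
  unfold Pre_passThroughDefun; infer_instance

def pvWitness_passThroughDefun : List String × Int := (["(", "defun", "x", ")"], 0)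

def Spec_passThroughDefun (input : List String) (startPlace : Int) (out : Int) : Prop := out = passThroughDefun_alt input startPlace
instance (input : List String) (startPlace : Int) (out : Int) : Decidable (Spec_passThroughDefun input startPlace out) := by unfold Spec_passThroughDefun; infer_instance

-- ===== CLAIM (what is proved, stated in full; the proofs are below) =====
def Claim_equal_passThroughDefun : Prop := ∀ (input : List String) (startPlace : Int), Dom_passThroughDefun input startPlace → Pre_passThroughDefun input startPlace → Spec_passThroughDefun input startPlace (passThroughDefun input startPlace)

-- ===== LEMMAS AND PROOFS =====

-- B's first loop is the same loop as A's helper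
theorem pvScanB_eq_pvCountA (input : List String) :
    ∀ (f : Nat) (a p : Int), pvScanB input a p f = pvCountA input a p f := by
  intro f
  induction f with
  | zero => intro a p; rfl
  | succ f ih =>
    intro a p
    simp only [pvScanB, pvCountA]
    cases PySem.List.pyGet? input p with
    | none => rfl
    | some x => by_cases hx : x = "(" <;> simp [hx, ih]

-- the counting loop on a run of k "(" followed by a non-"("
theorem pvCountA_run (input : List String) :
    ∀ (k : Nat) (s a : Int) (f : Nat) (x : String), k + 1 ≤ f →
      (∀ j : Nat, j < k → PySem.List.pyGet? input (s + (j : Int)) = some "(") →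
      PySem.List.pyGet? input (s + (k : Int)) = some x → x ≠ "(" →
      pvCountA input a s f = some (a + (k : Int), s + (k : Int) - 1) := by
  intro k
  induction k with
  | zero =>
    intro s a f x hf _ hx hne
    obtain ⟨f', rfl⟩ : ∃ f', f = f' + 1 := ⟨f - 1, by omega⟩
    have hx' : PySem.List.pyGet? input s = some x := by simpa using hx
    simp [pvCountA, hx', hne]
  | succ k ih =>
    intro s a f x hf hall hx hne
    obtain ⟨f', rfl⟩ : ∃ f', f = f' + 1 := ⟨f - 1, by omega⟩
    have h0 : PySem.List.pyGet? input s = some "(" := by simpa using hall 0 (by omega)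
    have hall' : ∀ j : Nat, j < k → PySem.List.pyGet? input (s + 1 + (j : Int)) = some "(" := by
      intro j hj
      have h := hall (j + 1) (by omega)
      push_cast at h
      rw [show s + 1 + (j : Int) = s + ((j : Int) + 1) by ring]
      exact h
    have hx2 : PySem.List.pyGet? input (s + 1 + (k : Int)) = some x := by
      push_cast at hx
      rw [show s + 1 + (k : Int) = s + ((k : Int) + 1) by ring]
      exact hx
    have hrec := ih (s + 1) (a + 1) f' x (by omega) hall' hx2 hne
    have hstep : pvCountA input a s (f' + 1) = pvCountA input (a + 1) (s + 1) f' := by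
      simp [pvCountA, h0]
    rw [hstep, hrec]
    simp only [Option.some_inj, Prod.mk.injEq]
    push_cast
    omega

-- findRightBracket with a starting accumulator
theorem pvFindRB_acc (input : List String) :
    ∀ (f : Nat) (st a : Int),
      pvFindRB input a st f = (pvFindRB input 0 st f).map (fun cq => (a + cq.1, cq.2)) := by
  intro f
  induction f with
  | zero => intro st a; rfl
  | succ f ih =>
    intro st a
    simp only [pvFindRB]
    cases PySem.List.pyGet? input st with
    | none => rfl
    | some x =>
      simp only [Option.bind_some]
      by_cases hr : x = ")"
      · simp [hr]
      · simp only [hr, if_false]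
        by_cases hl : x = "("
        · simp only [hl, if_true]
          rw [ih (st + 1) (a + 1), ih (st + 1) (0 + 1), Option.map_map]
          congr 1
          funext cq
          simp [add_assoc]
        · simp only [hl, if_false]
          rw [ih (st + 1) a, ih (st + 1) 0, Option.map_map]

-- fuel monotonicity of B's closing loop
theorem pvCloseB_mono (input : List String) :
    ∀ (f f' : Nat) (d p r : Int), f ≤ f' →
      pvCloseB input d p f = some r → pvCloseB input d p f' = some r := by
  intro f
  induction f with
  | zero => intro f' d p r _ h; simp [pvCloseB] at h
  | succ f ih =>
    intro f' d p r hle h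
    obtain ⟨f'', rfl⟩ : ∃ f'', f' = f'' + 1 := ⟨f' - 1, by omega⟩
    simp only [pvCloseB] at h ⊢
    by_cases hd : d > 0
    · simp only [hd, if_true] at h ⊢
      cases hg : PySem.List.pyGet? input (p + 1) with
      | none => rw [hg] at h; simp at h
      | some c =>
        rw [hg] at h
        simp only [Option.bind_some] at h ⊢
        exact ih f'' _ _ _ (by omega) h
    · simpa [hd] using h

-- one A-outer step simulates a chunk of B's loop
theorem pvStep (input : List String) :
    ∀ (f : Nat) (d p r : Int), 0 < d → pvCloseB input d p f = some r →
      ∃ (c q : Int) (g : Nat), g < f ∧ pvFindRB input 0 (p + 1) f = some (c, q) ∧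
        pvCloseB input (d + c - 1) q g = some r := by
  intro f
  induction f with
  | zero => intro d p r _ h; simp [pvCloseB] at h
  | succ f ih =>
    intro d p r hd h
    simp only [pvCloseB, hd, if_true] at h
    cases hg : PySem.List.pyGet? input (p + 1) with
    | none => rw [hg] at h; simp at h
    | some c0 =>
      rw [hg] at h
      simp only [Option.bind_some] at h
      by_cases hr : c0 = ")"
      · -- findRB stops immediately at p+1
        refine ⟨0, p + 1, f, by omega, ?_, ?_⟩
        · simp [pvFindRB, hg, hr]
        · rw [hr, if_neg (by decide : ¬(")" : String) = "("), if_pos rfl] at h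
          rw [show d + 0 - 1 = d + -1 by ring]
          exact h
      · -- findRB steps past c0
        have hδ : (if c0 = "(" then (1 : Int) else if c0 = ")" then -1 else 0)
                 = (if c0 = "(" then (1 : Int) else 0) := by
          by_cases hl : c0 = "(" <;> simp [hl, hr]
        rw [hδ] at h
        have hpos : 0 < d + (if c0 = "(" then (1 : Int) else 0) := by
          by_cases hl : c0 = "(" <;> simp [hl] <;> omega
        obtain ⟨c, q, g, hgf, hfrb, hcl⟩ := ih _ _ _ hpos h
        refine ⟨(if c0 = "(" then (1 : Int) else 0) + c, q, g, by omega, ?_, ?_⟩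
        · simp only [pvFindRB, hg, Option.bind_some, hr, if_false]
          have hacc : (if c0 = "(" then (0 : Int) + 1 else 0) = (if c0 = "(" then (1 : Int) else 0) := by
            by_cases hl : c0 = "(" <;> simp [hl]
          rw [hacc, pvFindRB_acc input f (p + 1 + 1), hfrb]
          rfl
        · rw [show d + ((if c0 = "(" then (1 : Int) else 0) + c) - 1
                = d + (if c0 = "(" then (1 : Int) else 0) + c - 1 by ring]
          exact hcl

-- A's outer loop returns whatever B's flat loop returns (same fuel)
theorem pvOuterA_eq (input : List String) :
    ∀ (f : Nat) (d p r : Int),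
      pvCloseB input d p f = some r → pvOuterA input d p f = some r := by
  intro f
  induction f with
  | zero => intro d p r h; simp [pvCloseB] at h
  | succ f ih =>
    intro d p r h
    by_cases hd : d > 0
    · obtain ⟨c, q, g, hgf, hfrb, hcl⟩ := pvStep input (f + 1) d p r hd h
      have hcl' : pvCloseB input (d + c - 1) q f = some r :=
        pvCloseB_mono input g f _ _ _ (by omega) hcl
      simp only [pvOuterA, hd, if_true, hfrb, Option.bind_some]
      exact ih _ _ _ hcl'
    · simp only [pvCloseB, hd, if_false] at h
      simp only [pvOuterA, hd, if_false]
      exact h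

-- the balance condition of Pre_ makes B's closing loop terminate
theorem pvCloseB_term (input : List String) :
    ∀ (m : Nat) (d p : Int) (f : Nat), 0 < d → 0 ≤ p + 1 →
      p + 1 + (m : Int) < (input.length : Int) →
      (∑ j ∈ Finset.range (m + 1), pvWt (PySem.List.pyGetD input (p + 1 + (j : Int)) "")) = d →
      m + 2 ≤ f → ∃ r, pvCloseB input d p f = some r := by
  intro m
  induction m with
  | zero =>
    intro d p f hd hp hlt hsum hf
    norm_num [Finset.sum_range_one] at hsum
    norm_num at hlt
    have hget : PySem.List.pyGet? input (p + 1) = some (PySem.List.pyGetD input (p + 1) "") := by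
      rw [PySem.List.pyGetD_eq_getElem input "" hp hlt]
      exact PySem.List.pyGet?_eq_some_getElem input hp hlt
    set c := PySem.List.pyGetD input (p + 1) "" with hc
    have hcr : c = ")" ∧ d = 1 := by
      unfold pvWt at hsum
      by_cases h1 : c = ")"
      · simp [h1] at hsum; exact ⟨h1, hsum.symm⟩
      · by_cases h2 : c = "(" <;> simp [h1, h2] at hsum <;> omega
    obtain ⟨f', rfl⟩ : ∃ f', f = f' + 2 := ⟨f - 2, by omega⟩
    refine ⟨p + 1, ?_⟩
    simp only [pvCloseB, hd, if_true, hget, Option.bind_some]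
    rw [hcr.1, if_neg (by decide : ¬(")" : String) = "("), if_pos rfl]
    rw [show d + -1 = 0 by omega]
    simp
  | succ m ih =>
    intro d p f hd hp hlt hsum hf
    have hin : p + 1 < (input.length : Int) := by omega
    have hget : PySem.List.pyGet? input (p + 1) = some (PySem.List.pyGetD input (p + 1) "") := by
      rw [PySem.List.pyGetD_eq_getElem input "" hp hin]
      exact PySem.List.pyGet?_eq_some_getElem input hp hin
    set c := PySem.List.pyGetD input (p + 1) "" with hc
    rw [Finset.sum_range_succ'] at hsum
    push_cast at hsum
    have hrw : ∀ j ∈ Finset.range (m + 1),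
        pvWt (PySem.List.pyGetD input (p + 1 + ((j : Int) + 1)) "")
        = pvWt (PySem.List.pyGetD input (p + 1 + 1 + (j : Int)) "") := by
      intro j _
      congr 2
      ring
    rw [Finset.sum_congr rfl hrw] at hsum
    norm_num at hsum
    have hsum' : (∑ j ∈ Finset.range (m + 1),
        pvWt (PySem.List.pyGetD input (p + 1 + 1 + (j : Int)) "")) = d - pvWt c := by
      rw [← hsum]; ring
    obtain ⟨f', rfl⟩ : ∃ f', f = f' + 1 := ⟨f - 1, by omega⟩
    by_cases hstop : c = ")" ∧ d = 1
    · refine ⟨p + 1, ?_⟩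
      simp only [pvCloseB, hd, if_true, hget, Option.bind_some]
      rw [hstop.1, if_neg (by decide : ¬(")" : String) = "("), if_pos rfl]
      rw [show d + -1 = 0 by omega]
      obtain ⟨f'', rfl⟩ : ∃ f'', f' = f'' + 1 := ⟨f' - 1, by omega⟩
      simp [pvCloseB]
    · have hstep : (if c = "(" then (1 : Int) else if c = ")" then -1 else 0) = - pvWt c := by
        unfold pvWt
        by_cases h1 : c = ")" <;> by_cases h2 : c = "(" <;> simp [h1, h2]
      have hd' : 0 < d - pvWt c := by
        unfold pvWt
        by_cases h1 : c = ")"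
        · have hne1 : d ≠ 1 := fun hh => hstop ⟨h1, hh⟩
          simp [h1]; omega
        · by_cases h2 : c = "(" <;> simp [h1, h2] <;> omega
      obtain ⟨r, hr⟩ := ih (d - pvWt c) (p + 1) f' hd' (by omega) (by omega) hsum' (by omega)
      refine ⟨r, ?_⟩
      simp only [pvCloseB, hd, if_true, hget, Option.bind_some]
      rw [hstep, show d + -pvWt c = d - pvWt c by ring]
      exact hr

-- ===== VERDICT (by name: the statement is the Claim_ definition above) =====
theorem passThroughDefun_spec : Claim_equal_passThroughDefun := by
  intro input s _hdom hpre
  unfold Spec_passThroughDefun passThroughDefun passThroughDefun_alt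
  rw [pvScanB_eq_pvCountA]
  rcases hpre with ⟨hneg, hge, hnp⟩ | ⟨hpos, k, hk, hks, hall, hne, hdef⟩
  · -- negative startPlace at a non-"(" token: both return startPlace - 1
    have hsome : ∃ x, PySem.List.pyGet? input s = some x := by
      rcases h : PySem.List.pyGet? input s with _ | x
      · rw [PySem.List.pyGet?_eq_none_iff] at h
        exact absurd (by constructor <;> omega : PySem.Raise.InRange input.length s) h
      · exact ⟨x, rfl⟩
    obtain ⟨x, hx⟩ := hsome
    have hxne : x ≠ "(" := fun h => hnp (h ▸ hx)
    have hcount : pvCountA input 0 s (input.length + 2) = some (0, s - 1) := by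
      have := pvCountA_run input 0 s 0 (input.length + 2) x (by omega)
        (by intro j hj; omega) (by simpa using hx) hxne
      simpa using this
    rw [hcount]
    simp only [Option.elim_some]
    have e1 : ((0 : Int), s - 1).2 + 1 = s := by
      show s - 1 + 1 = s
      ring
    rw [e1, hx]
    simp only [Option.elim_some]
    by_cases hxd : x = "defun"
    · simp only [hxd, ne_eq, not_true_eq_false, if_false]
      simp [pvOuterA, pvCloseB]
    · simp [hxd]
  · -- nonnegative startPlace, k leading "(", non-"(" token x at s+k
    have hin : (0 : Int) ≤ s + (k : Int) := by omega
    have hget : PySem.List.pyGet? input (s + (k : Int))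
        = some (PySem.List.pyGetD input (s + (k : Int)) "") := by
      rw [PySem.List.pyGetD_eq_getElem input "" hin hks]
      exact PySem.List.pyGet?_eq_some_getElem input hin hks
    set x := PySem.List.pyGetD input (s + (k : Int)) "" with hxdef
    have hxne : x ≠ "(" := fun h => hne (h ▸ hget)
    have hcount : pvCountA input 0 s (input.length + 2)
        = some ((k : Int), s + (k : Int) - 1) := by
      have := pvCountA_run input k s 0 (input.length + 2) x (by omega) hall hget hxne
      simpa using this
    rw [hcount]
    simp only [Option.elim_some]
    have e2 : ((k : Int), s + (k : Int) - 1).2 + 1 = s + (k : Int) := by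
      show s + (k : Int) - 1 + 1 = s + (k : Int)
      ring
    rw [e2, hget]
    simp only [Option.elim_some]
    by_cases hxd : x = "defun"
    · simp only [hxd, ne_eq, not_true_eq_false, if_false]
      by_cases hk0 : k = 0
      · subst hk0
        simp [pvOuterA, pvCloseB]
      · obtain ⟨m, hm, hms, hsum⟩ := hdef (hxd ▸ hget) (by omega)
        have hterm := pvCloseB_term input m (k : Int) (s + (k : Int) - 1) (input.length + 2)
          (by omega) (by omega)
          (by rw [show s + (k : Int) - 1 + 1 + (m : Int) = s + (k : Int) + (m : Int) by ring]; exact hms)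
          (by
            rw [Finset.sum_congr rfl (fun j _ => by
              rw [show s + (k : Int) - 1 + 1 + (j : Int) = s + (k : Int) + (j : Int) by ring])]
            exact hsum)
          (by omega)
        obtain ⟨r, hr⟩ := hterm
        rw [pvOuterA_eq input _ _ _ _ hr, hr]
        rfl
    · simp [hxd]
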